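-- pv_equiv track=rewrite | github.com/josephvolmer/yavs | src/yavs/utils/auto_detect.py | get_scanner_categories
-- ===== SOURCE A (Python) =====
-- from typing import Set, Dict, List
--
-- def get_scanner_categories(scanners: Set[str]) -> Dict[str, bool]:
--     """
--     Map detected scanners to scan mode categories.
--
--     Args:
--         scanners: Set of scanner names
--
--     Returns:
--         Dictionary mapping scan modes to boolean values
--     """
--     categories = {
--         "sast": False,
--         "sbom": False,
--         "compliance": False,
--         "secrets": False
--     }
--
--     # Map scanners to categories
--     if any(s in scanners for s in ["semgrep", "bandit", "binskim"]):
--         categories["sast"] = True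
--
--     if "trivy" in scanners:
--         categories["sbom"] = True
--         categories["secrets"] = True
--
--     if "checkov" in scanners:
--         categories["compliance"] = True
--
--     return categories
-- ===== SOURCE B (Python) =====
-- # Table-driven: iterate over the input scanners and look each one up in a
-- # static scanner -> categories table, flipping those categories to True.
-- _SCANNER_TABLE = {
--     "semgrep": ["sast"],
--     "bandit": ["sast"],
--     "binskim": ["sast"],
--     "trivy": ["sbom", "secrets"],
--     "checkov": ["compliance"],
-- }
--
-- def get_scanner_categories(scanners):
--     categories = {
--         "sast": False,
--         "sbom": False,
--         "compliance": False,
--         "secrets": False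
--     }
--     for s in scanners:
--         for cat in _SCANNER_TABLE.get(s, []):
--             categories[cat] = True
--     return categories
-- ===== Notes on version B (the rewrite author's own statement) =====
-- stated objective: alternative
-- what changed: Replaced the fixed chain of membership tests over hard-coded name lists by a single pass over the input set with a static scanner-to-categories lookup table that sets the enabled categories.
import Mathlib
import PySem

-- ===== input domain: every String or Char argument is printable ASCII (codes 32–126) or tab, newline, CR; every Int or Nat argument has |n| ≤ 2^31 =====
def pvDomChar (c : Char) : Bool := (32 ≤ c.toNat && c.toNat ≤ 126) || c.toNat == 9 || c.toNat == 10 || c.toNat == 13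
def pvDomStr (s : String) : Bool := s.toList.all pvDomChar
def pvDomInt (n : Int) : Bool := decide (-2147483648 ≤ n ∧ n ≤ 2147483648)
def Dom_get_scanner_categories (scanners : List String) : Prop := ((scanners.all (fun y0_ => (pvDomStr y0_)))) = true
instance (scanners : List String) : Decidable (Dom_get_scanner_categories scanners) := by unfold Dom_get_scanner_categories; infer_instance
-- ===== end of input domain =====

-- B replaces A's chain of membership tests over hard-coded name lists by one pass
-- over the input set with a static scanner→categories lookup table (objective: alternative).

-- ===== PORT A =====
def get_scanner_categories (scanners : List String) : List (String × Bool) :=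
  let categories : PySem.Dict String Bool :=
    PySem.Dict.mk [("sast", false), ("sbom", false), ("compliance", false), ("secrets", false)]
  let categories := if ["semgrep", "bandit", "binskim"].any (fun s => scanners.contains s)
    then categories.insert "sast" true else categories
  let categories := if scanners.contains "trivy"
    then (categories.insert "sbom" true).insert "secrets" true else categories
  let categories := if scanners.contains "checkov"
    then categories.insert "compliance" true else categories
  categories.items

-- ===== PORT B =====
def pvScannerTable : PySem.Dict String (List String) :=
  PySem.Dict.mk [("semgrep", ["sast"]), ("bandit", ["sast"]), ("binskim", ["sast"]),
                 ("trivy", ["sbom", "secrets"]), ("checkov", ["compliance"])]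

def get_scanner_categories_alt (scanners : List String) : List (String × Bool) :=
  let init : PySem.Dict String Bool :=
    PySem.Dict.mk [("sast", false), ("sbom", false), ("compliance", false), ("secrets", false)]
  (scanners.foldl (fun cats s =>
      (pvScannerTable.getD s []).foldl (fun c cat => c.insert cat true) cats) init).items

-- ===== PRECONDITION & SPEC =====
def Spec_get_scanner_categories (scanners : List String) (out : List (String × Bool)) : Prop := out = get_scanner_categories_alt scanners
instance (scanners : List String) (out : List (String × Bool)) : Decidable (Spec_get_scanner_categories scanners out) := by unfold Spec_get_scanner_categories; infer_instance

-- ===== CLAIM (what is proved, stated in full; the proofs are below) =====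
def Claim_equal_get_scanner_categories : Prop := ∀ (scanners : List String), Dom_get_scanner_categories scanners → Spec_get_scanner_categories scanners (get_scanner_categories scanners)

-- ===== LEMMAS AND PROOFS =====

-- One step of B's loop: looking x up in the table or-s its categories into the four flags.
lemma pv_step (x : String) (a b c d : Bool) :
    (pvScannerTable.getD x []).foldl (fun c cat => c.insert cat true)
      (PySem.Dict.mk [("sast", a), ("sbom", b), ("compliance", c), ("secrets", d)]) =
    PySem.Dict.mk
      [("sast", a || (x == "semgrep" || x == "bandit" || x == "binskim")),
       ("sbom", b || x == "trivy"),
       ("compliance", c || x == "checkov"),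
       ("secrets", d || x == "trivy")] := by
  by_cases h1 : x = "semgrep"
  · subst h1; cases a <;> cases b <;> cases c <;> cases d <;> decide
  by_cases h2 : x = "bandit"
  · subst h2; cases a <;> cases b <;> cases c <;> cases d <;> decide
  by_cases h3 : x = "binskim"
  · subst h3; cases a <;> cases b <;> cases c <;> cases d <;> decide
  by_cases h4 : x = "trivy"
  · subst h4; cases a <;> cases b <;> cases c <;> cases d <;> decide
  by_cases h5 : x = "checkov"
  · subst h5; cases a <;> cases b <;> cases c <;> cases d <;> decide
  · have hget : pvScannerTable.getD x [] = [] := by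
      simp [pvScannerTable, PySem.Dict.getD, PySem.Dict.get?,
            Ne.symm h1, Ne.symm h2, Ne.symm h3, Ne.symm h4, Ne.symm h5]
    rw [hget]
    simp [h1, h2, h3, h4, h5]

-- B's fold, from an arbitrary four-flag state, just or-s in the per-category hits.
lemma pv_foldB (l : List String) (a b c d : Bool) :
    l.foldl (fun cats s => (pvScannerTable.getD s []).foldl (fun c cat => c.insert cat true) cats)
      (PySem.Dict.mk [("sast", a), ("sbom", b), ("compliance", c), ("secrets", d)]) =
    PySem.Dict.mk
      [("sast", a || l.any fun s => s == "semgrep" || s == "bandit" || s == "binskim"),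
       ("sbom", b || l.any fun s => s == "trivy"),
       ("compliance", c || l.any fun s => s == "checkov"),
       ("secrets", d || l.any fun s => s == "trivy")] := by
  induction l generalizing a b c d with
  | nil => simp
  | cons x xs ih =>
    rw [List.foldl_cons, pv_step, ih]
    simp [List.any_cons, Bool.or_assoc]

lemma pv_any_sast (l : List String) :
    (l.any fun s => s == "semgrep" || s == "bandit" || s == "binskim") =
    (l.contains "semgrep" || l.contains "bandit" || l.contains "binskim") := by
  induction l with
  | nil => simp
  | cons x xs ih =>
    simp only [List.any_cons, ih]
    by_cases hx : x = "semgrep" <;> by_cases hy : x = "bandit" <;> by_cases hz : x = "binskim" <;>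
      simp_all [Bool.or_left_comm, Bool.or_comm, Bool.beq_eq_decide_eq, eq_comm]

lemma pv_any_one (l : List String) (k : String) :
    (l.any fun s => s == k) = l.contains k := by
  induction l with
  | nil => simp
  | cons x xs ih => by_cases h : x = k <;> simp_all [List.any_cons, Bool.beq_eq_decide_eq, eq_comm]

-- ===== VERDICT (by name: the statement is the Claim_ definition above) =====
theorem get_scanner_categories_spec : Claim_equal_get_scanner_categories := by
  intro scanners _
  unfold Spec_get_scanner_categories get_scanner_categories get_scanner_categories_alt
  simp only [List.any_cons, List.any_nil, Bool.or_false]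
  rw [pv_foldB, pv_any_sast, pv_any_one, pv_any_one]
  rw [Bool.or_assoc]
  generalize (scanners.contains "semgrep" || (scanners.contains "bandit" || scanners.contains "binskim")) = C1
  generalize scanners.contains "trivy" = C2
  generalize scanners.contains "checkov" = C3
  cases C1 <;> cases C2 <;> cases C3 <;> decide
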